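-- pv_equiv track=rewrite | github.com/ParadauxIO/td_language_analysis | archive/analyse_corpus.py | calculate_lexical_complexity
-- ===== SOURCE A (Python) =====
-- def calculate_lexical_complexity(frequency_dict, sentences, rarity_threshold=10000):
--     complexity_scores = []
--
--     frequency_dict = {word.lower(): count for word, count in frequency_dict.items()}
--
--     for sentence in sentences:
--         rare_word_count = 0
--
--         words = sentence.lower().split()
--
--         for word in words:
--             if word not in frequency_dict or frequency_dict[word] < rarity_threshold:
--                 rare_word_count += 1
--
--         complexity_scores.append(rare_word_count)
--
--     return complexity_scores
-- ===== SOURCE B (Python) =====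
-- def calculate_lexical_complexity(frequency_dict, sentences, rarity_threshold=10000):
--     # One up-front pass: normalise the map and keep only the common words.
--     lowered = {word.lower(): count for word, count in frequency_dict.items()}
--     common = {w for w, c in lowered.items() if c >= rarity_threshold}
--     scores = []
--     for sentence in sentences:
--         # Tally the sentence's words, then sum the multiplicities of the
--         # distinct words that are not common.
--         tally = {}
--         for w in sentence.lower().split():
--             tally[w] = tally.get(w, 0) + 1
--         scores.append(sum(n for w, n in tally.items() if w not in common))
--     return scores
-- ===== Notes on version B (the rewrite author's own statement) =====
-- stated objective: alternative
-- what changed: B applies the rarity threshold once up front to get a set of common words, then scores each sentence by building a word-frequency tally (dict of distinct words to multiplicities) and summing the multiplicities of its non-common distinct words, instead of A's per-token dict lookup and threshold comparison incrementing a counter.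
import Mathlib
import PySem

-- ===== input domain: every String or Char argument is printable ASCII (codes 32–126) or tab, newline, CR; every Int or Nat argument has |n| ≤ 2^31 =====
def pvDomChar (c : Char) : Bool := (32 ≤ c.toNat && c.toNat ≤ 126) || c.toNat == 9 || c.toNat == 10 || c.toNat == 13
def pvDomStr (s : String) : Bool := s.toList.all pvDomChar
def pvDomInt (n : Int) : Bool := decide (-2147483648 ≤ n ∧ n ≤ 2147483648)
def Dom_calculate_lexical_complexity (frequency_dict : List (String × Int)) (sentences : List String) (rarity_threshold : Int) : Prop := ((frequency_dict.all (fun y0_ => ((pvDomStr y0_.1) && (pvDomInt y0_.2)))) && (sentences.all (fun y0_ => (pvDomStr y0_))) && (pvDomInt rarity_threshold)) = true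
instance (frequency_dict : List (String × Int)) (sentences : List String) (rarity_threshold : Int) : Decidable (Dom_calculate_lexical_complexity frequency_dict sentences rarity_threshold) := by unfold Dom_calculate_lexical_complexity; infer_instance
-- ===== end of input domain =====

-- B filters the threshold once up front into a common-word set and scores each
-- sentence via a per-sentence word tally, summing multiplicities of its
-- non-common distinct words (objective: alternative).

-- ===== PORT A =====
def calculate_lexical_complexity (frequency_dict : List (String × Int)) (sentences : List String) (rarity_threshold : Int) : List Int :=
  -- frequency_dict = {word.lower(): count for word, count in frequency_dict.items()}
  let fd : PySem.Dict String Int :=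
    frequency_dict.foldl (fun d p => d.insert (PySem.Str.lower p.1) p.2) PySem.Dict.empty
  sentences.foldl (fun complexity_scores sentence =>
    let words := PySem.Str.split₀ (PySem.Str.lower sentence)
    let rare_word_count : Int := words.foldl (fun cnt word =>
      -- if word not in frequency_dict or frequency_dict[word] < rarity_threshold
      match fd.get? word with
      | none => cnt + 1
      | some c => if c < rarity_threshold then cnt + 1 else cnt) 0
    complexity_scores ++ [rare_word_count]) []

-- ===== PORT B =====
def calculate_lexical_complexity_alt (frequency_dict : List (String × Int)) (sentences : List String) (rarity_threshold : Int) : List Int :=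
  let lowered : PySem.Dict String Int :=
    frequency_dict.foldl (fun d p => d.insert (PySem.Str.lower p.1) p.2) PySem.Dict.empty
  -- common = {w for w, c in lowered.items() if c >= rarity_threshold}
  let common : PySem.Set String :=
    PySem.Set.ofList ((lowered.items.filter (fun p => rarity_threshold ≤ p.2)).map (·.1))
  sentences.foldl (fun scores sentence =>
    -- tally[w] = tally.get(w, 0) + 1
    let tally : PySem.Dict String Int :=
      (PySem.Str.split₀ (PySem.Str.lower sentence)).foldl
        (fun d w => d.insert w (d.getD w 0 + 1)) PySem.Dict.empty
    scores ++ [((tally.items.filter (fun q => !PySem.Set.contains common q.1)).map (·.2)).sum]) []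

-- ===== PRECONDITION & SPEC =====
def Spec_calculate_lexical_complexity (frequency_dict : List (String × Int)) (sentences : List String) (rarity_threshold : Int) (out : List Int) : Prop := out = calculate_lexical_complexity_alt frequency_dict sentences rarity_threshold
instance (frequency_dict : List (String × Int)) (sentences : List String) (rarity_threshold : Int) (out : List Int) : Decidable (Spec_calculate_lexical_complexity frequency_dict sentences rarity_threshold out) := by unfold Spec_calculate_lexical_complexity; infer_instance

-- ===== CLAIM (what is proved, stated in full; the proofs are below) =====
def Claim_equal_calculate_lexical_complexity : Prop := ∀ (frequency_dict : List (String × Int)) (sentences : List String) (rarity_threshold : Int), Dom_calculate_lexical_complexity frequency_dict sentences rarity_threshold → Spec_calculate_lexical_complexity frequency_dict sentences rarity_threshold (calculate_lexical_complexity frequency_dict sentences rarity_threshold)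

-- ===== LEMMAS AND PROOFS =====

-- A's rare counter as accumulator plus a countP.
lemma pv_foldlA (fd : PySem.Dict String Int) (th : Int) :
    ∀ (words : List String) (a : Int),
      words.foldl (fun cnt word =>
        match fd.get? word with
        | none => cnt + 1
        | some c => if c < th then cnt + 1 else cnt) a
      = a + (words.countP (fun w => !decide (∃ c, fd.get? w = some c ∧ th ≤ c)) : Int) := by
  intro words
  induction words with
  | nil => intro a; simp
  | cons w rest ih =>
    intro a
    simp only [List.foldl_cons, List.countP_cons]
    rw [ih]
    rcases hg : fd.get? w with _ | c
    · simp; ring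
    · by_cases hc : c < th
      · simp [hc, show ¬ th ≤ c by omega]; ring
      · simp [hc, show th ≤ c by omega]

-- Summing the multiplicities of the distinct words picked by a predicate
-- counts exactly the tokens satisfying it.
lemma pv_sum_count (p : String → Bool) :
    ∀ (L words : List String), L.Nodup → (∀ w, w ∈ L ↔ w ∈ words ∧ p w = true) →
      (L.map (fun w => (words.count w : Int))).sum = (words.countP p : Int) := by
  intro L
  induction L with
  | nil =>
    intro words _ hmem
    have : words.countP p = 0 := by
      rw [List.countP_eq_zero]
      intro w hw hp
      exact (List.not_mem_nil (a := w)).elim (by simpa using (hmem w).mpr ⟨hw, hp⟩)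
    simp [this]
  | cons a L ih =>
    intro words hnd hmem
    have hna : a ∉ L := (List.nodup_cons.mp hnd).1
    have hndL : L.Nodup := (List.nodup_cons.mp hnd).2
    have hmemL : ∀ w, w ∈ L ↔ w ∈ words.filter (fun x => !(x == a)) ∧ p w = true := by
      intro w
      constructor
      · intro hw
        have hne : w ≠ a := fun h => hna (h ▸ hw)
        have := (hmem w).mp (List.mem_cons_of_mem a hw)
        exact ⟨List.mem_filter.mpr ⟨this.1, by simp [hne]⟩, this.2⟩
      · rintro ⟨hw, hp⟩
        rcases List.mem_filter.mp hw with ⟨hw1, hw2⟩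
        have hne : w ≠ a := by simpa using hw2
        rcases List.mem_cons.mp ((hmem w).mpr ⟨hw1, hp⟩) with h | h
        · exact absurd h hne
        · exact h
    have hcounts : ∀ w ∈ L, words.count w = (words.filter (fun x => !(x == a))).count w := by
      intro w hw
      have hne : w ≠ a := fun h => hna (h ▸ hw)
      rw [List.count_filter]; simp [hne]
    have hmapeq : (L.map (fun w => (words.count w : Int))).sum
        = (L.map (fun w => ((words.filter (fun x => !(x == a))).count w : Int))).sum := by
      apply congrArg
      apply List.map_congr_left
      intro w hw; rw [hcounts w hw]
    have hpa : p a = true := ((hmem a).mp (List.mem_cons_self)).2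
    have hsplit : words.countP p
        = words.count a + (words.filter (fun x => !(x == a))).countP p := by
      have h := List.length_eq_countP_add_countP (fun x => x == a) (l := words.filter p)
      rw [List.countP_filter, List.countP_filter, ← List.countP_eq_length_filter] at h
      rw [h, List.countP_filter, List.count_eq_countP]
      congr 1
      · exact List.countP_congr (fun x _ => by by_cases hx : x = a <;> simp [hx, hpa])
      · exact List.countP_congr (fun x _ => by by_cases hx : x = a <;> simp [hx, hpa])
    simp only [List.map_cons, List.sum_cons, hmapeq, ih _ hndL hmemL, hsplit]
    push_cast
    ring

-- Membership in B's common set characterised by A's rebuilt dict.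
lemma pv_mem_common (lowered : PySem.Dict String Int) (hnd : lowered.keys.Nodup)
    (th : Int) (w : String) :
    w ∈ ((lowered.items.filter (fun p => decide (th ≤ p.2))).map (·.1))
      ↔ ∃ c, lowered.get? w = some c ∧ th ≤ c := by
  simp only [List.mem_map, List.mem_filter]
  constructor
  · rintro ⟨⟨k, c⟩, ⟨hm, hth⟩, rfl⟩
    exact ⟨c, PySem.Dict.get?_of_mem_items lowered hm hnd, by simpa using hth⟩
  · rintro ⟨c, hg, hth⟩
    exact ⟨(w, c), ⟨PySem.Dict.mem_items_of_get?_eq_some lowered hg, by simpa using hth⟩, rfl⟩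

-- ===== VERDICT (by name: the statement is the Claim_ definition above) =====
theorem calculate_lexical_complexity_spec : Claim_equal_calculate_lexical_complexity := by
  intro frequency_dict sentences rarity_threshold _
  unfold Spec_calculate_lexical_complexity calculate_lexical_complexity calculate_lexical_complexity_alt
  simp only
  rw [PySem.List.foldl_append_singleton_eq_map, PySem.List.foldl_append_singleton_eq_map]
  apply List.map_congr_left
  intro sentence _
  set lowered := frequency_dict.foldl (fun d p => d.insert (PySem.Str.lower p.1) p.2) PySem.Dict.empty with hlow
  have hnd : lowered.keys.Nodup := by
    rw [hlow]
    exact PySem.Dict.nodup_keys_foldl_insert_key frequency_dict (fun p => PySem.Str.lower p.1)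
      (fun d p => p.2) PySem.Dict.empty (by simp)
  set words := PySem.Str.split₀ (PySem.Str.lower sentence) with hw
  rw [pv_foldlA]
  rw [PySem.Dict.foldl_insert_getD_add_one_eq_counter, PySem.Dict.items_counter]
  rw [List.filter_map, List.map_map]
  simp only [Function.comp_def]
  rw [pv_sum_count
    (p := fun w => !decide (∃ c, lowered.get? w = some c ∧ rarity_threshold ≤ c))
    (L := (PySem.Set.ofList words).filter
      (fun k => !PySem.Set.contains
        (PySem.Set.ofList ((lowered.items.filter (fun p => rarity_threshold ≤ p.2)).map (·.1))) k))
    (words := words)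
    ((PySem.Set.nodup_ofList words).filter _)
    (by
      intro w
      have hch : (PySem.Set.contains (PySem.Set.ofList
            ((lowered.items.filter (fun p => rarity_threshold ≤ p.2)).map (·.1))) w = true)
          ↔ ∃ c, lowered.get? w = some c ∧ rarity_threshold ≤ c := by
        rw [PySem.Set.contains_iff, PySem.Set.mem_ofList]
        exact pv_mem_common lowered hnd rarity_threshold w
      rw [List.mem_filter, PySem.Set.mem_ofList]
      constructor
      · rintro ⟨hmem, hnc⟩
        refine ⟨hmem, ?_⟩
        have hne : ¬ ∃ c, lowered.get? w = some c ∧ rarity_threshold ≤ c := by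
          intro hx
          rw [← hch] at hx
          rw [hx] at hnc
          simp at hnc
        simp [hne]
      · rintro ⟨hmem, hp⟩
        refine ⟨hmem, ?_⟩
        have hne : ¬ ∃ c, lowered.get? w = some c ∧ rarity_threshold ≤ c := by
          simpa using hp
        have hcf : PySem.Set.contains (PySem.Set.ofList
            ((lowered.items.filter (fun p => rarity_threshold ≤ p.2)).map (·.1))) w = false := by
          cases hcc : PySem.Set.contains (PySem.Set.ofList
              ((lowered.items.filter (fun p => rarity_threshold ≤ p.2)).map (·.1))) w
          · rfl
          · exact absurd (hch.mp hcc) hne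
        simp only [hcf, Bool.not_false])]
  omega
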